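-- pv_equiv track=rewrite | github.com/Seooooooogi/Coding_exercise | math/Performance_Review.py | solution
-- ===== SOURCE A (Python) =====
-- def solution(scores):
--     n = len(scores)
--     wanho_score = scores[0]
--     wanho_sum = sum(wanho_score)
--
--     # 1. 완호가 인센티브를 받지 못하는 경우
--     for i in range(n):
--         if wanho_score[0] < scores[i][0] and wanho_score[1] < scores[i][1]:
--             return -1
--
--     arr = [(x, y, x + y) for x, y in scores]
--     arr.sort(key=lambda x:x[0], reverse=True)
--
--     max_y = -1
--     answer = 0
--     i = 0
--
--     while i < n:
--         # 같은 근무 태도 점수를 가진 사람들을 그룹으로 나눔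
--         x_curr = arr[i][0]
--         j = i
--         while j < n and arr[j][0] == x_curr:
--             j += 1
--
--         # 첫 번째 그룹은 인센티브 받지 못하는 사람이 없으므로 max_y = -1
--         # 두 번째 그룹부터 max_y보다 작으면 인센티브를 받지 못함
--         # 완호보다 점수 높은 사람만큼 등수를 올림
--         for k in range(i, j):
--             y_k, sum_k = arr[k][1], arr[k][2]
--             if y_k >= max_y and sum_k > wanho_sum:
--                 answer += 1
--
--         # 다음 그룹에 참고로 활용할 현재 그룹의 max_y 갱신
--         for k in range(i, j):
--             if arr[k][1] > max_y:
--                 max_y = arr[k][1]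
--
--         i = j
--
--     # 원호보다 등수 높은 사람을 전부 계산했기 때문에 +1이 정답
--     return answer + 1
-- ===== SOURCE B (Python) =====
-- def undominated(scores, p):
--     return all(not (qx > p[0] and qy > p[1]) for qx, qy in scores)
--
--
-- def solution(scores):
--     w = scores[0]
--     wsum = w[0] + w[1]
--     if not undominated(scores, w):
--         return -1
--     answer = 0
--     for p in scores:
--         if p[0] + p[1] > wsum and undominated(scores, p):
--             answer += 1
--     return answer + 1
-- ===== Notes on version B (the rewrite author's own statement) =====
-- stated objective: simpler
-- what changed: Replaces A's sort-by-x-descending plus grouped sweep with a running max_y by a direct O(n^2) count of employees whose score pair is not strictly dominated by anyone and whose sum exceeds employee 0's sum.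
-- intended difference: On inputs where nobody strictly dominates employee 0 but some employee has second score < -1 and sum above employee 0's, A's max_y = -1 sentinel can wrongly drop undominated such employees from the count (A returns a rank too low); B counts every undominated employee with a larger sum, the intended rank, since valid scores are compared by domination, not against a sentinel. — e.g. on solution([[0, 0], [5, -2]]): A returns 1, B returns 2
-- outside the precondition, e.g. on solution([[-3, 1, 1], [-1, 700, -4962]]): A returns -1, B raises ValueError; on solution([[1, 2], [3, 4], [5]]): A returns -1, B returns -1
import Mathlib
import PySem

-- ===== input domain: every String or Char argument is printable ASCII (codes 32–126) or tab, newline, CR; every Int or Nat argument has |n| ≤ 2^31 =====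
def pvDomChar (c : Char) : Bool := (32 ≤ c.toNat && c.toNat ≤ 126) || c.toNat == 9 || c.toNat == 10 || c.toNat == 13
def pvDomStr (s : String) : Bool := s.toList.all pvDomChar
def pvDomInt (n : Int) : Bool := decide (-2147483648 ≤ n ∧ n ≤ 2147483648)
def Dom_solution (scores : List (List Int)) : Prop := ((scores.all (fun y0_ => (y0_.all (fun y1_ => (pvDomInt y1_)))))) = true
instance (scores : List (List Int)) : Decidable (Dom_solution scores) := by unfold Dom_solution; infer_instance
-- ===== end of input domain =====

-- B replaces A's sort-descending-by-x plus grouped sweep with a running max_y by a direct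
-- quadratic count of the employees nobody strictly dominates whose sum beats employee 0's
-- (simpler; not faster). A's max_y = -1 sentinel is wrong for second scores below -1 — see D_solution.

-- ===== PORT A =====
def pvX (s : List Int) : Int := s.headD 0            -- s[0]  (rows have length 2 under Pre_)
def pvY (s : List Int) : Int := (s.drop 1).headD 0   -- s[1]

def pvSum (s : List Int) : Int := pvX s + pvY s   -- x + y

-- the dominance comparison of A's early scan: both of v's scores strictly larger than u's
abbrev pvLt2 (u v : List Int) : Prop := pvX u < pvX v ∧ pvY u < pvY v

def pvT (s : List Int) : Int × Int × Int := (pvX s, pvY s, pvSum s)   -- (x, y, x + y)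

-- A's outer while-loop over the sorted array, one recursive step per x-group;
-- fuel = length of the remaining array (never exhausted when started at arr.length).
def pvAGroups (wsum : Int) : Nat → List (Int × Int × Int) → Int → Int → Int
  | _, [], _, answer => answer
  | 0, _ :: _, _, answer => answer
  | fuel + 1, t :: rest, maxY, answer =>
    let grp := t :: rest.takeWhile (fun u => u.1 == t.1)
    let rest' := rest.dropWhile (fun u => u.1 == t.1)
    let answer' := grp.foldl (fun a u => if u.2.1 ≥ maxY ∧ u.2.2 > wsum then a + 1 else a) answer
    let maxY' := grp.foldl (fun m u => if u.2.1 > m then u.2.1 else m) maxY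
    pvAGroups wsum fuel rest' maxY' answer'

def solution (scores : List (List Int)) : Int :=
  match scores with
  | [] => 0   -- scores[0] raises IndexError in Python; excluded by Pre_solution
  | w :: _ =>
    let wsum := w.sum
    if scores.any (fun s => decide (pvLt2 w s)) then -1
    else
      let arr := PySem.List.sorted (scores.map pvT) (fun t => t.1) true
      pvAGroups wsum arr.length arr (-1) 0 + 1

-- ===== PORT B =====
-- Source B's helper: no row of scores strictly dominates row p in both coordinates (decidable scan)
abbrev pvFree (l : List (List Int)) (p : List Int) : Prop :=
  ∀ q ∈ l, ¬ pvLt2 p q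

def solution_alt (scores : List (List Int)) : Int :=
  match scores with
  | [] => 0   -- scores[0] raises IndexError in Python; excluded by Pre_solution
  | w :: _ =>
    let wsum := pvX w + pvY w
    if ¬ pvFree scores w then -1
    else
      scores.foldl
        (fun a p =>
          if pvX p + pvY p > wsum ∧ pvFree scores p
          then a + 1 else a) 0 + 1

-- ===== PRECONDITION & SPEC =====
-- Pre_ requires a nonempty list whose rows all have exactly two scores: on an empty list A raises
-- IndexError, and on ragged rows A raises (IndexError/ValueError) unless an early dominating row
-- happens to trigger the -1 return before a malformed row is touched — an accident of scan order.
def Pre_solution (scores : List (List Int)) : Prop :=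
  scores ≠ [] ∧ ∀ s ∈ scores, s.length = 2
instance (scores : List (List Int)) : Decidable (Pre_solution scores) := by
  unfold Pre_solution; infer_instance

def pvWitness_solution : List (List Int) := [[1, 2], [3, 1]]

-- On inputs where nobody strictly dominates employee 0 but some undominated employee has second
-- score < -1 and sum above employee 0's, A's max_y = -1 sentinel wrongly drops that employee from
-- the count (rank too low); B counts every undominated employee with a larger sum, the intended
-- rank, since scores are compared by domination, not against the sentinel.
def D_solution (scores : List (List Int)) : Prop :=
  scores ≠ [] ∧ ∃ p ∈ scores, pvY p < -1 ∧ pvSum (scores.headD []) < pvSum p ∧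
    ∀ q ∈ scores, ¬ pvLt2 (scores.headD []) q ∧ ¬ pvLt2 p q
instance (scores : List (List Int)) : Decidable (D_solution scores) := by
  unfold D_solution; infer_instance

def Spec_solution (scores : List (List Int)) (out : Int) : Prop :=
  ¬ D_solution scores → out = solution_alt scores
instance (scores : List (List Int)) (out : Int) : Decidable (Spec_solution scores out) := by
  unfold Spec_solution; infer_instance

def pvDiffWitness_solution : List (List Int) := [[0, 0], [5, -2]]
def pvDiffWitnessOut_solution : Int × Int := (1, 2)

-- ===== CLAIM (what is proved, stated in full; the proofs are below) =====
def Claim_unchanged_solution : Prop :=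
  ∀ (scores : List (List Int)), Dom_solution scores → Pre_solution scores →
    Spec_solution scores (solution scores)
def Claim_changed_solution : Prop :=
  Dom_solution (pvDiffWitness_solution) ∧ Pre_solution (pvDiffWitness_solution) ∧
  D_solution (pvDiffWitness_solution) ∧
  solution (pvDiffWitness_solution) = pvDiffWitnessOut_solution.1 ∧
  solution_alt (pvDiffWitness_solution) = pvDiffWitnessOut_solution.2 ∧
  pvDiffWitnessOut_solution.1 ≠ pvDiffWitnessOut_solution.2
def Claim_exact_solution : Prop :=
  ∀ (scores : List (List Int)), Dom_solution scores → Pre_solution scores →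
    D_solution scores → solution scores ≠ solution_alt scores

-- ===== LEMMAS AND PROOFS =====

lemma pv_dropWhile_lt (c : Int) :
    ∀ (l : List (Int × Int × Int)), l.Pairwise (fun a b => b.1 ≤ a.1) →
      (∀ u ∈ l, u.1 ≤ c) →
      ∀ u ∈ l.dropWhile (fun u => u.1 == c), u.1 < c := by
  intro l
  induction l with
  | nil => intro _ _ u hu; simp at hu
  | cons v vs ih =>
    intro hp hle u hu
    rw [List.dropWhile_cons] at hu
    by_cases hv : v.1 = c
    · simp [hv] at hu
      exact ih (List.pairwise_cons.mp hp).2 (fun x hx => hle x (.tail _ hx)) u hu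
    · simp [hv] at hu
      have hvlt : v.1 < c := lt_of_le_of_ne (hle v (.head _)) hv
      rcases hu with rfl | hu
      · exact hvlt
      · exact lt_of_le_of_lt ((List.pairwise_cons.mp hp).1 u hu) hvlt

lemma pv_foldl_max_le_iff {α : Type} (f : α → Int) (z : Int) :
    ∀ (l : List α) (m : Int),
      (l.foldl (fun acc u => max acc (f u)) m ≤ z ↔ m ≤ z ∧ ∀ u ∈ l, f u ≤ z) := by
  intro l
  induction l with
  | nil => intro m; simp
  | cons v vs ih =>
    intro m
    simp only [List.foldl_cons, ih, max_le_iff, List.forall_mem_cons]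
    tauto

lemma pv_countP_lt_of_witness {α : Type} (p q : α → Bool) :
    ∀ (l : List α), (∀ x ∈ l, p x = true → q x = true) →
      ∀ x ∈ l, q x = true → p x = false → l.countP p < l.countP q := by
  intro l
  induction l with
  | nil => intro _ x hx; simp at hx
  | cons v vs ih =>
    intro himp x hx hq hp
    rw [List.countP_cons, List.countP_cons]
    rcases List.mem_cons.mp hx with rfl | hx
    · have := List.countP_mono_left (l := vs) (p := p) (q := q)
        (fun y hy => himp y (.tail _ hy))
      simp [hp, hq]; omega
    · have := ih (fun y hy => himp y (.tail _ hy)) x hx hq hp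
      have hv : p v = true → q v = true := himp v (.head _)
      cases hpv : p v <;> simp [hpv, hv] <;> omega

-- characterisation of A's grouped sweep on a descending-by-fst array
lemma pvAGroups_eq (wsum : Int) :
    ∀ (fuel : Nat) (arr : List (Int × Int × Int)) (maxY answer : Int),
      arr.length ≤ fuel →
      arr.Pairwise (fun a b => b.1 ≤ a.1) →
      pvAGroups wsum fuel arr maxY answer
        = answer + (arr.countP (fun t =>
            decide (maxY ≤ t.2.1 ∧ wsum < t.2.2 ∧
              ∀ q ∈ arr, ¬(t.1 < q.1 ∧ t.2.1 < q.2.1))) : Int) := by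
  intro fuel
  induction fuel with
  | zero =>
    intro arr maxY answer hlen _
    have harr : arr = [] := List.length_eq_zero_iff.mp (Nat.le_zero.mp hlen)
    subst harr; simp [pvAGroups]
  | succ fuel ih =>
    intro arr maxY answer hlen hp
    match arr with
    | [] => simp [pvAGroups]
    | t :: rest =>
      have hle : ∀ u ∈ rest, u.1 ≤ t.1 := (List.pairwise_cons.mp hp).1
      have hps : rest.Pairwise (fun a b => b.1 ≤ a.1) := (List.pairwise_cons.mp hp).2
      have hdk_lt : ∀ u ∈ rest.dropWhile (fun u => u.1 == t.1), u.1 < t.1 :=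
        pv_dropWhile_lt t.1 rest hps hle
      have hgrp_eq : ∀ u ∈ t :: rest.takeWhile (fun u => u.1 == t.1), u.1 = t.1 := by
        intro u hu
        rcases List.mem_cons.mp hu with rfl | hu
        · rfl
        · simpa using List.mem_takeWhile_imp hu
      have hsplit : rest = rest.takeWhile (fun u => u.1 == t.1)
          ++ rest.dropWhile (fun u => u.1 == t.1) := (List.takeWhile_append_dropWhile).symm
      -- abbreviations
      set grp := t :: rest.takeWhile (fun u => u.1 == t.1) with hgrp
      set dk := rest.dropWhile (fun u => u.1 == t.1) with hdk
      set M' := grp.foldl (fun m u => if u.2.1 > m then u.2.1 else m) maxY with hM'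
      have hMmax : M' = grp.foldl (fun m u => max m u.2.1) maxY := by
        rw [hM']
        apply PySem.List.foldl_congr_mem
        intro acc u _
        rw [max_def]; split_ifs <;> omega
      have hMle : ∀ z : Int, (M' ≤ z ↔ maxY ≤ z ∧ ∀ u ∈ grp, u.2.1 ≤ z) := by
        intro z; rw [hMmax]; exact pv_foldl_max_le_iff (fun u => u.2.1) z grp maxY
      have harr2 : t :: rest = grp ++ dk := by
        rw [hgrp, hdk]
        exact congrArg (t :: ·) hsplit
      -- one step of the recursion
      have hstep : pvAGroups wsum (fuel + 1) (t :: rest) maxY answer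
          = pvAGroups wsum fuel dk M'
              (grp.foldl (fun a u => if u.2.1 ≥ maxY ∧ u.2.2 > wsum then a + 1 else a) answer) := by
        rw [pvAGroups]
      rw [hstep]
      have hdklen : dk.length ≤ fuel := by
        have h1 : dk.length ≤ rest.length := by
          rw [hdk]; exact List.length_dropWhile_le _ _
        simp at hlen; omega
      have hdkp : dk.Pairwise (fun a b => b.1 ≤ a.1) :=
        List.Pairwise.sublist (List.dropWhile_sublist _) hps
      rw [ih dk M' _ hdklen hdkp]
      rw [PySem.List.foldl_ite_add_one]
      -- now rewrite the RHS count
      conv_rhs => rw [harr2]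
      rw [List.countP_append]
      have hq_le : ∀ q ∈ grp ++ dk, q.1 ≤ t.1 := by
        intro q hq
        rcases List.mem_append.mp hq with hq | hq
        · exact le_of_eq (hgrp_eq q hq)
        · exact le_of_lt (hdk_lt q hq)
      have hcg : grp.countP (fun u =>
            decide (maxY ≤ u.2.1 ∧ wsum < u.2.2 ∧
              ∀ q ∈ grp ++ dk, ¬(u.1 < q.1 ∧ u.2.1 < q.2.1)))
          = grp.countP (fun u => decide (u.2.1 ≥ maxY ∧ u.2.2 > wsum)) := by
        apply List.countP_congr
        intro u hu
        have hu1 : u.1 = t.1 := hgrp_eq u hu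
        simp only [decide_eq_true_eq]
        constructor
        · rintro ⟨h1, h2, _⟩; exact ⟨h1, h2⟩
        · rintro ⟨h1, h2⟩
          refine ⟨h1, h2, fun q hq hcon => ?_⟩
          have := hq_le q hq; omega
      have hcd : dk.countP (fun u =>
            decide (maxY ≤ u.2.1 ∧ wsum < u.2.2 ∧
              ∀ q ∈ grp ++ dk, ¬(u.1 < q.1 ∧ u.2.1 < q.2.1)))
          = dk.countP (fun u =>
            decide (M' ≤ u.2.1 ∧ wsum < u.2.2 ∧
              ∀ q ∈ dk, ¬(u.1 < q.1 ∧ u.2.1 < q.2.1))) := by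
        apply List.countP_congr
        intro u hu
        have hu1 : u.1 < t.1 := hdk_lt u hu
        simp only [decide_eq_true_eq]
        have hsplitq : (∀ q ∈ grp ++ dk, ¬(u.1 < q.1 ∧ u.2.1 < q.2.1))
            ↔ (∀ q ∈ grp, q.2.1 ≤ u.2.1) ∧ (∀ q ∈ dk, ¬(u.1 < q.1 ∧ u.2.1 < q.2.1)) := by
          constructor
          · intro h
            refine ⟨fun q hq => ?_, fun q hq => h q (List.mem_append.mpr (Or.inr hq))⟩
            have hq1 : q.1 = t.1 := hgrp_eq q hq
            have := h q (List.mem_append.mpr (Or.inl hq))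
            omega
          · rintro ⟨h1, h2⟩ q hq
            rcases List.mem_append.mp hq with hq | hq
            · have hq1 : q.1 = t.1 := hgrp_eq q hq
              have := h1 q hq; omega
            · exact h2 q hq
        rw [hsplitq, hMle u.2.1]
        tauto
      rw [hcg, hcd]
      push_cast
      ring

-- under Pre_ and with nobody dominating employee 0, both ports are 1 + a count over the input
lemma pv_counts (w : List Int) (tl : List (List Int))
    (hw2 : w.length = 2)
    (hc : ¬ ((w :: tl).any (fun s => decide (pvLt2 w s)) = true)) :
    solution (w :: tl)
      = 1 + ((w :: tl).countP (fun p =>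
          decide (-1 ≤ pvY p ∧ pvX w + pvY w < pvX p + pvY p ∧
            ∀ q ∈ w :: tl, ¬(pvX p < pvX q ∧ pvY p < pvY q))) : Int)
    ∧ solution_alt (w :: tl)
      = 1 + ((w :: tl).countP (fun p =>
          decide (pvX w + pvY w < pvX p + pvY p ∧
            ∀ q ∈ w :: tl, ¬(pvX p < pvX q ∧ pvY p < pvY q))) : Int) := by
  obtain ⟨a, b, rfl⟩ := List.length_eq_two.mp hw2
  have hsum : ([a, b] : List Int).sum = pvX [a, b] + pvY [a, b] := by
    simp [pvX, pvY]
  constructor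
  · -- port A
    simp only [solution]
    rw [if_neg hc]
    set L := (([a, b] : List Int) :: tl).map pvT with hL
    set S := PySem.List.sorted L (fun t => t.1) true with hS
    have hpair : S.Pairwise (fun u v => v.1 ≤ u.1) := by
      have := PySem.List.sorted_pairwise_rev (xs := L) (key := fun t : Int × Int × Int => t.1)
      simpa [hS] using this
    rw [pvAGroups_eq _ S.length S (-1) 0 le_rfl hpair]
    have hmem : ∀ q, q ∈ S ↔ q ∈ L := by
      intro q; rw [hS]; exact PySem.List.mem_sorted L (fun t : Int × Int × Int => t.1) true q
    have c1 : S.countP (fun t =>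
          decide ((-1 : Int) ≤ t.2.1 ∧ ([a, b] : List Int).sum < t.2.2 ∧
            ∀ q ∈ S, ¬(t.1 < q.1 ∧ t.2.1 < q.2.1)))
        = S.countP (fun t =>
          decide ((-1 : Int) ≤ t.2.1 ∧ ([a, b] : List Int).sum < t.2.2 ∧
            ∀ q ∈ L, ¬(t.1 < q.1 ∧ t.2.1 < q.2.1))) := by
      apply List.countP_congr
      intro t _
      simp only [decide_eq_true_eq]
      constructor
      · rintro ⟨h1, h2, h3⟩
        exact ⟨h1, h2, fun q hq => h3 q ((hmem q).mpr hq)⟩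
      · rintro ⟨h1, h2, h3⟩
        exact ⟨h1, h2, fun q hq => h3 q ((hmem q).mp hq)⟩
    have c2 : S.countP (fun t =>
          decide ((-1 : Int) ≤ t.2.1 ∧ ([a, b] : List Int).sum < t.2.2 ∧
            ∀ q ∈ L, ¬(t.1 < q.1 ∧ t.2.1 < q.2.1)))
        = L.countP (fun t =>
          decide ((-1 : Int) ≤ t.2.1 ∧ ([a, b] : List Int).sum < t.2.2 ∧
            ∀ q ∈ L, ¬(t.1 < q.1 ∧ t.2.1 < q.2.1))) :=
      (PySem.List.sorted_perm (xs := L) (key := fun t : Int × Int × Int => t.1) (rev := true)).countP_eq _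
    have c3 : L.countP (fun t =>
          decide ((-1 : Int) ≤ t.2.1 ∧ ([a, b] : List Int).sum < t.2.2 ∧
            ∀ q ∈ L, ¬(t.1 < q.1 ∧ t.2.1 < q.2.1)))
        = (([a, b] : List Int) :: tl).countP (fun p =>
          decide ((-1 : Int) ≤ pvY p ∧ pvX [a, b] + pvY [a, b] < pvX p + pvY p ∧
            ∀ q ∈ ([a, b] : List Int) :: tl, ¬(pvX p < pvX q ∧ pvY p < pvY q))) := by
      rw [hL, List.countP_map]
      apply List.countP_congr
      intro p _
      simp only [Function.comp_apply, pvT, pvSum, decide_eq_true_eq, List.forall_mem_map, hsum]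
    rw [c1, c2, c3]
    ring
  · -- port B
    simp only [solution_alt]
    have hfree : pvFree (([a, b] : List Int) :: tl) [a, b] := by
      intro q hq hcon
      exact hc (List.any_eq_true.mpr ⟨q, hq, by simpa using hcon⟩)
    rw [if_neg (not_not_intro hfree)]
    rw [PySem.List.foldl_ite_add_one]
    have c4 : (([a, b] : List Int) :: tl).countP (fun p =>
          decide (pvX p + pvY p > pvX [a, b] + pvY [a, b] ∧
            pvFree (([a, b] : List Int) :: tl) p))
        = (([a, b] : List Int) :: tl).countP (fun p =>
          decide (pvX [a, b] + pvY [a, b] < pvX p + pvY p ∧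
            ∀ q ∈ ([a, b] : List Int) :: tl, ¬(pvX p < pvX q ∧ pvY p < pvY q))) := by
      apply List.countP_congr
      intro p _
      simp only [pvFree, pvLt2, decide_eq_true_eq, gt_iff_lt]
    rw [c4]
    ring

-- with nobody dominating employee 0, hc holds iff the pointwise form holds
lemma pv_any_iff (w : List Int) (tl : List (List Int)) :
    ¬ ((w :: tl).any (fun s => decide (pvLt2 w s)) = true)
      ↔ ∀ p ∈ w :: tl, ¬ pvLt2 w p := by
  simp [pvLt2]

-- ===== VERDICT (by name: the statement is the Claim_ definition above) =====
theorem solution_spec : Claim_unchanged_solution := by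
  intro scores hdom hpre hnD
  obtain ⟨hne, hlen2⟩ := hpre
  match scores with
  | w :: tl =>
    by_cases hc : ((w :: tl).any (fun s => decide (pvLt2 w s)) = true)
    · simp only [solution, solution_alt]
      have hnf : ¬ pvFree (w :: tl) w := by
        rcases List.any_eq_true.mp hc with ⟨q, hq, hdq⟩
        intro hf
        exact hf q hq (by simpa using hdq)
      rw [if_pos hc, if_pos hnf]
    · obtain ⟨hA, hB⟩ := pv_counts w tl (hlen2 w (List.mem_cons_self)) hc
      rw [hA, hB]
      have hnodom : ∀ p ∈ w :: tl, ¬ pvLt2 w p :=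
        (pv_any_iff w tl).mp hc
      have hno : ∀ p ∈ w :: tl,
          ¬(pvY p < -1 ∧ pvSum w < pvSum p ∧ pvFree (w :: tl) p) := by
        intro p hp hcon
        refine hnD ⟨List.cons_ne_nil _ _, p, hp, hcon.1, ?_, ?_⟩
        · simp only [List.headD_cons]
          exact hcon.2.1
        · simp only [List.headD_cons]
          exact fun q hq => ⟨hnodom q hq, hcon.2.2 q hq⟩
      congr 1
      congr 1
      apply List.countP_congr
      intro p hp
      simp only [decide_eq_true_eq]
      constructor
      · rintro ⟨_, h2, h3⟩; exact ⟨h2, h3⟩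
      · rintro ⟨h2, h3⟩
        refine ⟨?_, h2, h3⟩
        by_contra hy
        exact hno p hp ⟨by omega, by simpa [pvSum] using h2, h3⟩

theorem solution_changed : Claim_changed_solution := by
  unfold Claim_changed_solution; decide

theorem solution_tight : Claim_exact_solution := by
  intro scores hdom hpre hD
  obtain ⟨hne, hlen2⟩ := hpre
  match scores with
  | w :: tl =>
    obtain ⟨-, p, hp, hy, hsum, hall⟩ := hD
    simp only [List.headD_cons] at hall hsum
    simp only [pvSum] at hsum
    have hfp : ∀ q ∈ w :: tl, ¬ pvLt2 p q := fun q hq => (hall q hq).2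
    have hc : ¬ ((w :: tl).any (fun s => decide (pvLt2 w s)) = true) :=
      (pv_any_iff w tl).mpr (fun q hq => (hall q hq).1)
    obtain ⟨hA, hB⟩ := pv_counts w tl (hlen2 w (List.mem_cons_self)) hc
    rw [hA, hB]
    have hlt : (w :: tl).countP (fun p =>
          decide (-1 ≤ pvY p ∧ pvX w + pvY w < pvX p + pvY p ∧
            ∀ q ∈ w :: tl, ¬(pvX p < pvX q ∧ pvY p < pvY q)))
        < (w :: tl).countP (fun p =>
          decide (pvX w + pvY w < pvX p + pvY p ∧
            ∀ q ∈ w :: tl, ¬(pvX p < pvX q ∧ pvY p < pvY q))) := by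
      apply pv_countP_lt_of_witness _ _ _ ?_ p hp ?_ ?_
      · intro x _ hx
        simp only [decide_eq_true_eq] at hx ⊢
        exact ⟨hx.2.1, hx.2.2⟩
      · simp only [decide_eq_true_eq]
        exact ⟨hsum, hfp⟩
      · simp only [decide_eq_false_iff_not]
        intro hcon
        omega
    intro heq
    omega
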